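-- pv_equiv track=rewrite | github.com/intel/RAAD | src/software/parse/bufdict.py | fnvChecksum32
-- ===== SOURCE A (Python) =====
-- def fnvChecksum32(bytes, size=None, skip=0):
--     '''
--     FNV FW 32b checksum for an array of 'bytes'
--     Default 'size' will be len(bytes)
--     Use 'skip' to skip starting bytes (default 0)
--     '''
--     if size == None: size = len(bytes)
--
--     csum = 0
--     idx = skip
--
--     while idx < size:
--         csum = 0xFFFFFFFF & (csum + bytes[idx] * (1 << (8 * (idx % 4))))
--         idx += 1
--
--     return 0xFFFFFFFF & (~(csum) + 1)
-- ===== SOURCE B (Python) =====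
-- def fnvChecksum32(bytes, size=None, skip=0):
--     '''
--     FNV FW 32b checksum for an array of 'bytes'
--     Default 'size' will be len(bytes)
--     Use 'skip' to skip starting bytes (default 0)
--     '''
--     if size is None:
--         size = len(bytes)
--     # one pass into four stride buckets, no per-step masking
--     s = [0, 0, 0, 0]
--     for idx in range(skip, size):
--         s[idx % 4] += bytes[idx]
--     csum = (s[0] + s[1] * 256 + s[2] * 65536 + s[3] * 16777216) & 0xFFFFFFFF
--     return 0xFFFFFFFF & (~csum + 1)
-- ===== Notes on version B (the rewrite author's own statement) =====
-- stated objective: alternative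
-- what changed: Replaces the per-step masked accumulator (csum = (csum + byte*weight) & 0xFFFFFFFF each iteration) by four stride-indexed bucket sums filled in one pass with no masking; the 32-bit mask and the byte weights 1,256,65536,16777216 are applied once after the loop.
import Mathlib
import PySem

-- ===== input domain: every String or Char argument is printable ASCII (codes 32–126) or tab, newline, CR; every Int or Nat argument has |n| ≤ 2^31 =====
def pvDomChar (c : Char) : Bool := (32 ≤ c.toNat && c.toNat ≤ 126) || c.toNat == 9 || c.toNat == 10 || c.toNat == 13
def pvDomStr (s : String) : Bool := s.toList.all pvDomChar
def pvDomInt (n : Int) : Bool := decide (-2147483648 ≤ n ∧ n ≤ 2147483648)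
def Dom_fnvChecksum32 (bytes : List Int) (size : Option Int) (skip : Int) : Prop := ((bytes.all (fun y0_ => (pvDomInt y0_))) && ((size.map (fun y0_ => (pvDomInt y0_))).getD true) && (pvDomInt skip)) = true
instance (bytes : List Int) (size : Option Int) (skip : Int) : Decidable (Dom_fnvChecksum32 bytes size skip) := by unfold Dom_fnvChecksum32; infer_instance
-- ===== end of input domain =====

-- B replaces A's per-step 32-bit masking of one running checksum by four unmasked
-- stride-bucket sums filled in one pass, weighting and masking once after the loop
-- (objective: alternative).

-- ===== PORT A =====
-- the 'while idx < size' loop: csum = 0xFFFFFFFF & (csum + bytes[idx] * (1 << (8 * (idx % 4))))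
def fnvA_loop (bytes : List Int) (sz : Int) (csum : Int) (idx : Int) : Int :=
  if h : idx < sz then
    fnvA_loop bytes sz
      (PySem.Int.band 4294967295
        (csum + PySem.List.pyGetD bytes idx 0 * ((1 : Int) <<< (8 * PySem.Int.mod idx 4).toNat)))
      (idx + 1)
  else csum
termination_by (sz - idx).toNat
decreasing_by omega

def fnvChecksum32 (bytes : List Int) (size : Option Int) (skip : Int) : Int :=
  let sz : Int := match size with | none => (bytes.length : Int) | some s => s
  let csum := fnvA_loop bytes sz 0 skip
  PySem.Int.band 4294967295 (Int.not csum + 1)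

-- ===== PORT B =====
-- s[idx % 4] += bytes[idx]
def fnvB_step (bytes : List Int) (s : List Int) (idx : Int) : List Int :=
  s.set (PySem.Int.mod idx 4).toNat
    (PySem.List.pyGetD s (PySem.Int.mod idx 4) 0 + PySem.List.pyGetD bytes idx 0)

def fnvChecksum32_alt (bytes : List Int) (size : Option Int) (skip : Int) : Int :=
  let sz : Int := match size with | none => (bytes.length : Int) | some s => s
  let s := (PySem.List.pyRange skip sz 1).foldl (fnvB_step bytes) [0, 0, 0, 0]
  let csum := PySem.Int.band
    (PySem.List.pyGetD s 0 0 + PySem.List.pyGetD s 1 0 * 256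
      + PySem.List.pyGetD s 2 0 * 65536 + PySem.List.pyGetD s 3 0 * 16777216)
    4294967295
  PySem.Int.band 4294967295 (Int.not csum + 1)

-- ===== PRECONDITION & SPEC =====
-- Pre_ excludes exactly the inputs where Python's bytes[idx] raises IndexError (A and B
-- index the same positions skip..size-1, so both raise on exactly those inputs).
def Pre_fnvChecksum32 (bytes : List Int) (size : Option Int) (skip : Int) : Prop :=
  skip < size.getD (bytes.length : Int) →
    (-(bytes.length : Int) ≤ skip ∧ size.getD (bytes.length : Int) ≤ (bytes.length : Int))
instance (bytes : List Int) (size : Option Int) (skip : Int) : Decidable (Pre_fnvChecksum32 bytes size skip) := by unfold Pre_fnvChecksum32; infer_instance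
def pvWitness_fnvChecksum32 : List Int × Option Int × Int := ([1, 2, 3, 250, 7], none, 0)

def Spec_fnvChecksum32 (bytes : List Int) (size : Option Int) (skip : Int) (out : Int) : Prop := out = fnvChecksum32_alt bytes size skip
instance (bytes : List Int) (size : Option Int) (skip : Int) (out : Int) : Decidable (Spec_fnvChecksum32 bytes size skip out) := by unfold Spec_fnvChecksum32; infer_instance

-- ===== CLAIM (what is proved, stated in full; the proofs are below) =====
def Claim_equal_fnvChecksum32 : Prop := ∀ (bytes : List Int) (size : Option Int) (skip : Int), Dom_fnvChecksum32 bytes size skip → Pre_fnvChecksum32 bytes size skip → Spec_fnvChecksum32 bytes size skip (fnvChecksum32 bytes size skip)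

-- ===== LEMMAS AND PROOFS =====

-- the per-index contribution both programs accumulate: bytes[i] * 2^(8*(i%4))
def fnvTerm (bytes : List Int) (i : Int) : Int :=
  PySem.List.pyGetD bytes i 0 * ((1 : Int) <<< (8 * PySem.Int.mod i 4).toNat)

-- the weighted sum of B's four buckets
def fnvWsum (s : List Int) : Int :=
  PySem.List.pyGetD s 0 0 + PySem.List.pyGetD s 1 0 * 256
    + PySem.List.pyGetD s 2 0 * 65536 + PySem.List.pyGetD s 3 0 * 16777216

lemma band_mask (a : Int) : PySem.Int.band a 4294967295 = a % 4294967296 := by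
  unfold PySem.Int.band
  by_cases ha : 0 ≤ a
  · simp only [ha, if_true, show (0:Int) ≤ 4294967295 by norm_num]
    have h : a.toNat &&& (4294967295 : Int).toNat = a.toNat % 4294967296 := by
      have := Nat.and_two_pow_sub_one_eq_mod a.toNat 32
      norm_num at this; exact this
    rw [h]; omega
  · simp only [ha, if_false, show (0:Int) ≤ 4294967295 by norm_num, if_true]
    have h : (4294967295 : Int).toNat &&& (-a - 1).toNat = (-a - 1).toNat % 4294967296 := by
      rw [Nat.and_comm]
      have := Nat.and_two_pow_sub_one_eq_mod (-a - 1).toNat 32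
      norm_num at this
      convert this using 2 <;> omega
    rw [h]; omega

lemma loopA_eq (bytes : List Int) (sz : Int) : ∀ (n : Nat) (idx csum : Int),
    (sz - idx).toNat = n → idx < sz →
    fnvA_loop bytes sz csum idx
      = (csum + ((PySem.List.pyRange idx sz 1).map (fnvTerm bytes)).sum) % 4294967296 := by
  intro n
  induction n using Nat.strong_induction_on with
  | _ n ih =>
    intro idx csum hn h
    rw [fnvA_loop, dif_pos h]
    rw [PySem.List.pyRange_one_cons h, List.map_cons, List.sum_cons]
    by_cases h2 : idx + 1 < sz
    · rw [ih ((sz - (idx + 1)).toNat) (by omega) (idx + 1) _ rfl h2]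
      rw [PySem.Int.band_comm, band_mask]
      simp only [fnvTerm]
      omega
    · have hnil : PySem.List.pyRange (idx + 1) sz 1 = [] :=
        PySem.List.pyRange_one_eq_nil (by omega)
      rw [fnvA_loop, dif_neg h2, hnil, List.map_nil, List.sum_nil]
      rw [PySem.Int.band_comm, band_mask]
      simp only [fnvTerm, add_zero]

lemma foldB_eq (bytes : List Int) (l : List Int) : ∀ (a b c d : Int),
    fnvWsum (l.foldl (fnvB_step bytes) [a, b, c, d])
    = a + b * 256 + c * 65536 + d * 16777216 + (l.map (fnvTerm bytes)).sum := by
  induction l with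
  | nil =>
    intro a b c d
    simp only [List.foldl_nil, List.map_nil, List.sum_nil, add_zero]
    rfl
  | cons i l ih =>
    intro a b c d
    have hcase : PySem.Int.mod i 4 = 0 ∨ PySem.Int.mod i 4 = 1 ∨ PySem.Int.mod i 4 = 2 ∨ PySem.Int.mod i 4 = 3 := by
      have h0 : (0:Int) ≤ PySem.Int.mod i 4 := PySem.Int.mod_nonneg i (by norm_num)
      have h4 : PySem.Int.mod i 4 < 4 := PySem.Int.mod_lt i (by norm_num)
      omega
    simp only [List.foldl_cons, List.map_cons, List.sum_cons]
    rcases hcase with hm | hm | hm | hm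
    · have hset : fnvB_step bytes [a, b, c, d] i = [a + PySem.List.pyGetD bytes i 0, b, c, d] := by
        simp only [fnvB_step, hm]; rfl
      have ht : fnvTerm bytes i = PySem.List.pyGetD bytes i 0 * 1 := by
        simp only [fnvTerm, hm]; rfl
      rw [hset, ih, ht]; ring
    · have hset : fnvB_step bytes [a, b, c, d] i = [a, b + PySem.List.pyGetD bytes i 0, c, d] := by
        simp only [fnvB_step, hm]; rfl
      have ht : fnvTerm bytes i = PySem.List.pyGetD bytes i 0 * 256 := by
        simp only [fnvTerm, hm]; rfl
      rw [hset, ih, ht]; ring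
    · have hset : fnvB_step bytes [a, b, c, d] i = [a, b, c + PySem.List.pyGetD bytes i 0, d] := by
        simp only [fnvB_step, hm]; rfl
      have ht : fnvTerm bytes i = PySem.List.pyGetD bytes i 0 * 65536 := by
        simp only [fnvTerm, hm]; rfl
      rw [hset, ih, ht]; ring
    · have hset : fnvB_step bytes [a, b, c, d] i = [a, b, c, d + PySem.List.pyGetD bytes i 0] := by
        simp only [fnvB_step, hm]; rfl
      have ht : fnvTerm bytes i = PySem.List.pyGetD bytes i 0 * 16777216 := by
        simp only [fnvTerm, hm]; rfl
      rw [hset, ih, ht]; ring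

lemma csum_eq (bytes : List Int) (sz skip : Int) :
    fnvA_loop bytes sz 0 skip
      = PySem.Int.band
          (fnvWsum ((PySem.List.pyRange skip sz 1).foldl (fnvB_step bytes) [0, 0, 0, 0]))
          4294967295 := by
  rw [band_mask, foldB_eq]
  by_cases h : skip < sz
  · rw [loopA_eq bytes sz (sz - skip).toNat skip 0 rfl h]
    norm_num
  · rw [fnvA_loop, dif_neg h, PySem.List.pyRange_one_eq_nil (by omega)]
    norm_num

-- ===== VERDICT (by name: the statement is the Claim_ definition above) =====
theorem fnvChecksum32_spec : Claim_equal_fnvChecksum32 := by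
  intro bytes size skip _hdom _hpre
  show fnvChecksum32 bytes size skip = fnvChecksum32_alt bytes size skip
  simp only [fnvChecksum32, fnvChecksum32_alt]
  rw [csum_eq]
  rfl
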